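-- pv_equiv track=rewrite | github.com/mauricioprb/otimizacao-computacional | resolver-sistema/refatorado.py | retorna_coeficiente
-- ===== SOURCE A (Python) =====
-- def retorna_coeficiente(linha, pos):
--     valor = []
--     pc = pos-1
--     while pc >= 0:
--         if linha[pc] == '+' or linha[pc] == '-':
--             if linha[pc] == '-':
--                 valor.append(linha[pc])  # Adiciona '-' ao valor
--                 if len(valor) == 1:
--                     valor.insert(0, '1')  # Adiciona '1' antes do '-'
--                 break
--             else:
--                 if len(valor) == 0:
--                     valor.append('1')
--                 break
--         valor.append(linha[pc])
--         pc -= 1  # move-se para a esquerda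
--     valor.reverse()
--     return ''.join(valor)
-- ===== SOURCE B (Python) =====
-- def retorna_coeficiente(linha, pos):
--     # scan left for the first sign, remembering only its index; build the result by slicing
--     j = None
--     pc = pos - 1
--     while pc >= 0:
--         if linha[pc] == '+' or linha[pc] == '-':
--             j = pc
--             break
--         pc -= 1
--     if j is None:
--         return linha[:pos] if pos > 0 else ''
--     digits = linha[j+1:pos]
--     if linha[j] == '-':
--         return '-' + (digits if digits else '1')
--     return digits if digits else '1'
-- ===== Notes on version B (the rewrite author's own statement) =====
-- stated objective: simpler
-- what changed: B scans left only to find the first sign's index and then builds the result with string slicing, instead of accumulating characters one by one into a list, patching it in place and reversing it.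
import Mathlib
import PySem

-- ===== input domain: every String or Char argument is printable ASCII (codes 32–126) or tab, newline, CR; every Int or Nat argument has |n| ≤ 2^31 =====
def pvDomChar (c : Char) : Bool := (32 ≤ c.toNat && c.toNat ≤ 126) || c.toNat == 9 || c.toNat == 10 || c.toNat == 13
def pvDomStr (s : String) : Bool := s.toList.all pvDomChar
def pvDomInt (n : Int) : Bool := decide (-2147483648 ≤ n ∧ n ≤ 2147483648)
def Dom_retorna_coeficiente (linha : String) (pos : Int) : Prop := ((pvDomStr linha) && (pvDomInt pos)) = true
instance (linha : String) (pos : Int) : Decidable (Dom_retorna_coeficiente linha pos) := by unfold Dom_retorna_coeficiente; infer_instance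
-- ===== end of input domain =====

-- B replaces A's char-by-char accumulator/reverse with a sign-index scan plus slicing; same return value everywhere both return.

-- ===== PORT A =====
-- while pc >= 0 loop, recursing downward on pc (Nat); valor is the accumulator list.
-- linha[pc] is ported as pyGetD (in range on every input admitted by Pre_).
def loopA (cs : List Char) : Nat → List Char → List Char
  | pc, valor =>
    let c := PySem.List.pyGetD cs (pc : Int) ' '
    if c = '+' ∨ c = '-' then
      if c = '-' then
        let v := valor ++ [c]
        if v.length = 1 then '1' :: v else v
      else
        if valor.length = 0 then valor ++ ['1'] else valor
    else
      match pc with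
      | 0 => valor ++ [c]
      | pc' + 1 => loopA cs pc' (valor ++ [c])

def retorna_coeficiente (linha : String) (pos : Int) : String :=
  let valor := if 0 ≤ pos - 1 then loopA linha.toList (pos - 1).toNat [] else []
  String.ofList valor.reverse

-- ===== PORT B =====
-- scan left for the index of the first '+'/'-' (None if absent)
def findSign (cs : List Char) (pc : Nat) : Option Nat :=
  let c := PySem.List.pyGetD cs (pc : Int) ' '
  if c = '+' ∨ c = '-' then some pc
  else
    match pc with
    | 0 => none
    | pc' + 1 => findSign cs pc'
termination_by pc

def retorna_coeficiente_alt (linha : String) (pos : Int) : String :=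
  let cs := linha.toList
  let j? := if 0 ≤ pos - 1 then findSign cs (pos - 1).toNat else none
  match j? with
  | none => if 0 < pos then String.ofList (PySem.List.slice cs none (some pos)) else ""
  | some j =>
    let digits := PySem.List.slice cs (some ((j : Int) + 1)) (some pos)
    if PySem.List.pyGetD cs (j : Int) ' ' = '-' then
      "-" ++ (if digits = [] then "1" else String.ofList digits)
    else
      if digits = [] then "1" else String.ofList digits

-- ===== PRECONDITION & SPEC =====
-- Pre_ excludes exactly the inputs where A raises IndexError: pos - 1 beyond the end of linha.
def Pre_retorna_coeficiente (linha : String) (pos : Int) : Prop := pos ≤ linha.length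
instance (linha : String) (pos : Int) : Decidable (Pre_retorna_coeficiente linha pos) := by unfold Pre_retorna_coeficiente; infer_instance

def pvWitness_retorna_coeficiente : String × Int := ("2x+13y", 5)

def Spec_retorna_coeficiente (linha : String) (pos : Int) (out : String) : Prop := out = retorna_coeficiente_alt linha pos
instance (linha : String) (pos : Int) (out : String) : Decidable (Spec_retorna_coeficiente linha pos out) := by unfold Spec_retorna_coeficiente; infer_instance

-- ===== CLAIM (what is proved, stated in full; the proofs are below) =====
def Claim_equal_retorna_coeficiente : Prop := ∀ (linha : String) (pos : Int), Dom_retorna_coeficiente linha pos → Pre_retorna_coeficiente linha pos → Spec_retorna_coeficiente linha pos (retorna_coeficiente linha pos)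

-- ===== LEMMAS AND PROOFS =====

-- the segment of cs from index j+1 up to and including index pc
def seg (cs : List Char) (j pc : Nat) : List Char := (cs.take (pc + 1)).drop (j + 1)

theorem take_succ_getD (cs : List Char) (n : Nat) (h : n < cs.length) :
    cs.take (n + 1) = cs.take n ++ [cs[n]?.getD ' '] := by
  rw [List.take_add_one, List.getElem?_eq_getElem h]
  rfl

theorem loopA_none (cs : List Char) (pc : Nat) (hpc : pc < cs.length)
    (valor : List Char) (h : findSign cs pc = none) :
    loopA cs pc valor = valor ++ (cs.take (pc + 1)).reverse := by
  induction pc generalizing valor with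
  | zero =>
    rw [findSign] at h
    rw [loopA]
    simp only [PySem.List.pyGetD_natCast, List.getD] at h ⊢
    by_cases hc : cs[(0 : Nat)]?.getD ' ' = '+' ∨ cs[(0 : Nat)]?.getD ' ' = '-'
    · rw [if_pos hc] at h
      exact absurd h (by simp)
    · rw [if_neg hc]
      rw [take_succ_getD cs 0 hpc]
      simp
  | succ pc' ih =>
    rw [findSign] at h
    rw [loopA]
    simp only [PySem.List.pyGetD_natCast, List.getD, Nat.succ_eq_add_one] at h ⊢
    by_cases hc : cs[pc' + 1]?.getD ' ' = '+' ∨ cs[pc' + 1]?.getD ' ' = '-'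
    · rw [if_pos hc] at h
      exact absurd h (by simp)
    · rw [if_neg hc] at h
      rw [if_neg hc]
      rw [ih (by omega) _ h, take_succ_getD cs (pc' + 1) hpc]
      simp

theorem loopA_some (cs : List Char) (pc : Nat) (hpc : pc < cs.length)
    (valor : List Char) (j : Nat) (h : findSign cs pc = some j) :
    j ≤ pc ∧
    loopA cs pc valor =
      (let w := valor ++ (seg cs j pc).reverse
       if PySem.List.pyGetD cs (j : Int) ' ' = '-' then
         (if w = [] then ['1', '-'] else w ++ ['-'])
       else (if w = [] then ['1'] else w)) := by
  induction pc generalizing valor with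
  | zero =>
    rw [findSign] at h
    rw [loopA]
    simp only [PySem.List.pyGetD_natCast, List.getD] at h ⊢
    by_cases hc : cs[(0 : Nat)]?.getD ' ' = '+' ∨ cs[(0 : Nat)]?.getD ' ' = '-'
    · rw [if_pos hc] at h
      injection h with h'
      subst h'
      refine ⟨le_refl _, ?_⟩
      have hseg : seg cs 0 0 = [] := by simp [seg]
      rw [if_pos hc, hseg]
      by_cases hm : cs[(0 : Nat)]?.getD ' ' = '-'
      · rw [if_pos hm, if_pos hm]
        by_cases hv : valor = [] <;> simp [hv, hm, List.length_eq_zero_iff]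
      · rw [if_neg hm, if_neg hm]
        by_cases hv : valor = [] <;> simp [hv, List.length_eq_zero_iff]
    · rw [if_neg hc] at h
      exact absurd h (by simp)
  | succ pc' ih =>
    rw [findSign] at h
    rw [loopA]
    simp only [PySem.List.pyGetD_natCast, List.getD, Nat.succ_eq_add_one] at h ⊢
    by_cases hc : cs[pc' + 1]?.getD ' ' = '+' ∨ cs[pc' + 1]?.getD ' ' = '-'
    · rw [if_pos hc] at h
      injection h with h'
      subst h'
      refine ⟨le_refl _, ?_⟩
      have hseg : seg cs (pc' + 1) (pc' + 1) = [] := by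
        simp only [seg, List.drop_eq_nil_iff, List.length_take]
        omega
      rw [if_pos hc, hseg]
      by_cases hm : cs[pc' + 1]?.getD ' ' = '-'
      · rw [if_pos hm, if_pos hm]
        by_cases hv : valor = [] <;> simp [hv, hm, List.length_eq_zero_iff]
      · rw [if_neg hm, if_neg hm]
        by_cases hv : valor = [] <;> simp [hv, List.length_eq_zero_iff]
    · rw [if_neg hc] at h
      rw [if_neg hc]
      obtain ⟨hj, heq⟩ := ih (by omega) (valor ++ [cs[pc' + 1]?.getD ' ']) h
      refine ⟨by omega, ?_⟩
      rw [heq]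
      have hseg : seg cs j (pc' + 1) = seg cs j pc' ++ [cs[pc' + 1]?.getD ' '] := by
        unfold seg
        rw [take_succ_getD cs (pc' + 1) hpc,
            List.drop_append_of_le_length (by simp [List.length_take]; omega)]
      rw [hseg]
      simp only [PySem.List.pyGetD_natCast, List.getD, List.reverse_append,
        List.reverse_cons, List.reverse_nil, List.nil_append,
        List.append_assoc, List.cons_append]

-- ===== VERDICT (by name: the statement is the Claim_ definition above) =====
theorem retorna_coeficiente_spec : Claim_equal_retorna_coeficiente := by
  intro linha pos _ hpre
  unfold Spec_retorna_coeficiente retorna_coeficiente retorna_coeficiente_alt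
  dsimp only
  by_cases hp : 0 ≤ pos - 1
  · rw [if_pos hp, if_pos hp]
    set cs := linha.toList with hcs
    have hlen : pos ≤ (cs.length : Int) := by
      unfold Pre_retorna_coeficiente at hpre
      simpa [hcs] using hpre
    have hpc : (pos - 1).toNat < cs.length := by omega
    have hpos1 : (pos - 1).toNat + 1 = pos.toNat := by omega
    cases hfs : findSign cs (pos - 1).toNat with
    | none =>
      rw [loopA_none cs _ hpc [] hfs]
      dsimp only
      rw [if_pos (by omega : (0 : Int) < pos)]
      rw [PySem.List.slice_to _ (by omega : (0 : Int) ≤ pos)]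
      rw [hpos1]
      simp
    | some j =>
      obtain ⟨hj, heq⟩ := loopA_some cs _ hpc [] j hfs
      rw [heq]
      dsimp only
      have hdig : PySem.List.slice cs (some ((j : Int) + 1)) (some pos) = seg cs j (pos - 1).toNat := by
        rw [PySem.List.slice_toNat _ (by omega) (by omega)]
        unfold seg
        rw [List.drop_take]
        congr 1
        omega
      rw [hdig]
      simp only [List.nil_append]
      by_cases hminus : PySem.List.pyGetD cs (j : Int) ' ' = '-'
      · rw [if_pos hminus, if_pos hminus]
        by_cases hw : seg cs j (pos - 1).toNat = []
        · rw [if_pos (by simp only [List.reverse_eq_nil_iff]; exact hw), if_pos hw]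
          decide
        · rw [if_neg (by simp only [List.reverse_eq_nil_iff]; exact hw), if_neg hw]
          have hm : ("-" : String) = String.ofList ['-'] := rfl
          rw [hm, ← String.ofList_append]
          simp
      · rw [if_neg hminus, if_neg hminus]
        by_cases hw : seg cs j (pos - 1).toNat = []
        · rw [if_pos (by simp only [List.reverse_eq_nil_iff]; exact hw), if_pos hw]
          decide
        · rw [if_neg (by simp only [List.reverse_eq_nil_iff]; exact hw), if_neg hw]
          simp
  · rw [if_neg hp, if_neg hp]
    dsimp only
    rw [if_neg (show ¬(0 : Int) < pos from by omega)]
    decide
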